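-- pv_equiv track=rewrite | github.com/saurabhtripathicse/github_repo_markdown_creator_ai | src/markdown_formatter.py | _fix_heading_punctuation
-- ===== SOURCE A (Python) =====
-- def _fix_heading_punctuation(content: str) -> str:
--     """Fix trailing punctuation in headings (MD026)."""
--     lines = content.split('\n')
--     result = []
--
--     for line in lines:
--         if line.startswith('#') and ' ' in line:
--             # It's a heading, remove trailing punctuation
--             heading_text = line.split(' ', 1)[1]
--             if heading_text and heading_text[-1] in '.,;:!?':
--                 line = line[:-1]
--
--         result.append(line)
--
--     return '\n'.join(result)
-- ===== SOURCE B (Python) =====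
-- def _fix_heading_punctuation(content: str) -> str:
--     """Fix trailing punctuation in headings (MD026)."""
--     pieces = []
--     s = content
--     while True:
--         nl = s.find('\n')
--         end = len(s) if nl == -1 else nl
--         if s[:1] == '#':
--             sp = s.find(' ')
--             if sp != -1 and sp + 1 < end and s[end - 1] in '.,;:!?':
--                 end -= 1
--         pieces.append(s[:end])
--         if nl == -1:
--             return '\n'.join(pieces)
--         s = s[nl + 1:]
-- ===== Notes on version B (the rewrite author's own statement) =====
-- stated objective: alternative
-- what changed: Replaces the split-into-lines list, per-line split(' ',1) and final join with a single cursor scan of the string using str.find for the next newline and the first space, deciding the strip by index arithmetic and emitting one slice per line.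
import Mathlib
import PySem

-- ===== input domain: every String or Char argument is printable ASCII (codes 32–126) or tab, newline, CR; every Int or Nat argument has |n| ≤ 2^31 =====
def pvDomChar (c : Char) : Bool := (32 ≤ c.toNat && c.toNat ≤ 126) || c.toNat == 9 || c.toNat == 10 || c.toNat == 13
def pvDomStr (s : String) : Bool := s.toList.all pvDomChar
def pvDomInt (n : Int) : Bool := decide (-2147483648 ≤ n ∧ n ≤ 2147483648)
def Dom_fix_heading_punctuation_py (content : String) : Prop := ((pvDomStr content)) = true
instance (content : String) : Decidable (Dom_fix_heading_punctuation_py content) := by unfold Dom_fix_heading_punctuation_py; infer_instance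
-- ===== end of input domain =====

-- B restructures A's split-into-lines/per-line-split/join pass into a single cursor scan driven by str.find; same return value, no side effects.

-- ===== PORT A =====
-- '.,;:!?' as a list of characters
def pvPunct : List Char := ['.', ',', ';', ':', '!', '?']

-- the body of A's per-line loop iteration
def pvAFix (line : List Char) : List Char :=
  if PySem.Chars.startswith line ['#'] && PySem.Chars.isIn [' '] line then
    -- line.split(' ', 1)[1] — index 1 exists because ' ' in line is guarded above
    let heading := PySem.List.pyGetD ((PySem.Chars.splitMax? line [' '] 1).getD []) 1 []
    if !heading.isEmpty && PySem.Chars.isIn [PySem.List.pyGetD heading (-1) ' '] pvPunct then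
      PySem.List.slice line none (some (-1))   -- line[:-1]
    else line
  else line

def fix_heading_punctuation_py (content : String) : String :=
  let lines := PySem.Chars.splitOn content.toList ['\n']
  let result := lines.foldl (fun acc line => acc ++ [pvAFix line]) []
  String.ofList (PySem.Chars.join ['\n'] result)

-- ===== PORT B =====
-- termination helper for B's scan: a found '\n' lies strictly inside s
theorem pvFindNlLt (s : List Char) (h : ¬ PySem.Chars.find s ['\n'] = -1) :
    (PySem.Chars.find s ['\n']).toNat < s.length := by
  have h0 : 0 ≤ PySem.Chars.find s ['\n'] := by
    have := PySem.Chars.neg_one_le_find (s := s) (sub := ['\n'])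
    omega
  obtain ⟨hpre, -⟩ := PySem.Chars.find_spec h0
  obtain ⟨t, ht⟩ := hpre
  have hne : s.drop (PySem.Chars.find s ['\n']).toNat ≠ [] := by
    rw [← ht]; simp
  rw [ne_eq, List.drop_eq_nil_iff] at hne
  omega

-- the while loop of B: one iteration per line, recursing on the suffix after the found '\n'
def fix_heading_punctuation_py_altGo (s : List Char) : List (List Char) :=
  let nl := PySem.Chars.find s ['\n']
  let e : Int := if nl = -1 then (s.length : Int) else nl
  let e' : Int :=
    if PySem.List.slice s none (some 1) = ['#'] then
      let sp := PySem.Chars.find s [' ']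
      if sp ≠ -1 ∧ sp + 1 < e ∧ PySem.Chars.isIn [PySem.List.pyGetD s (e - 1) ' '] pvPunct then e - 1
      else e
    else e
  if h : nl = -1 then [PySem.List.slice s none (some e')]
  else PySem.List.slice s none (some e') :: fix_heading_punctuation_py_altGo (PySem.List.slice s (some (nl + 1)) none)
termination_by s.length
decreasing_by
  have hlt := pvFindNlLt s h
  have h0 : 0 ≤ PySem.Chars.find s ['\n'] := by
    have := PySem.Chars.neg_one_le_find (s := s) (sub := ['\n'])
    omega
  simp only [PySem.List.slice, PySem.List.clampIdx, List.length_take, List.length_drop]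
  rw [if_neg (by omega : ¬ (PySem.Chars.find s ['\n'] + 1 < 0))]
  omega

def fix_heading_punctuation_py_alt (content : String) : String :=
  String.ofList (PySem.Chars.join ['\n'] (fix_heading_punctuation_py_altGo content.toList))

-- ===== PRECONDITION & SPEC =====
def Spec_fix_heading_punctuation_py (content : String) (out : String) : Prop := out = fix_heading_punctuation_py_alt content
instance (content : String) (out : String) : Decidable (Spec_fix_heading_punctuation_py content out) := by unfold Spec_fix_heading_punctuation_py; infer_instance

-- ===== CLAIM (what is proved, stated in full; the proofs are below) =====
def Claim_equal_fix_heading_punctuation_py : Prop := ∀ (content : String), Dom_fix_heading_punctuation_py content → Spec_fix_heading_punctuation_py content (fix_heading_punctuation_py content)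

-- ===== LEMMAS AND PROOFS =====

-- clean reference model of str.split(sep) for a one-character separator
def pvSplit (c : Char) : List Char → List (List Char)
  | [] => [[]]
  | x :: xs =>
    if x = c then [] :: pvSplit c xs
    else
      match pvSplit c xs with
      | [] => []
      | h :: t => (x :: h) :: t

theorem pvSplit_ne_nil (c : Char) (l : List Char) : pvSplit c l ≠ [] := by
  induction l with
  | nil => simp [pvSplit]
  | cons x xs ih =>
    simp only [pvSplit]
    split
    · simp
    · cases hx : pvSplit c xs with
      | nil => exact absurd hx ih
      | cons h t => simp

def pvMapHead (f : List Char → List Char) : List (List Char) → List (List Char)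
  | [] => []
  | h :: t => f h :: t

-- splitOn.go computed against the reference model
theorem pvGoEq (c : Char) : ∀ (fuel : Nat) (l cur : List Char) (acc : List (List Char)),
    l.length ≤ fuel →
    PySem.Chars.splitOn.go [c] fuel l cur acc =
      acc.reverse ++ pvMapHead (cur.reverse ++ ·) (pvSplit c l) := by
  intro fuel
  induction fuel with
  | zero =>
    intro l cur acc h
    have hl : l = [] := by
      cases l with
      | nil => rfl
      | cons x xs => simp at h
    subst hl
    simp [PySem.Chars.splitOn.go, pvSplit, pvMapHead]
  | succ f ih =>
    intro l cur acc h
    cases l with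
    | nil => simp [PySem.Chars.splitOn.go, pvSplit, pvMapHead]
    | cons x xs =>
      simp only [List.length_cons] at h
      by_cases hx : x = c
      · subst hx
        have hpre : [x].isPrefixOf (x :: xs) = true := by simp [List.isPrefixOf]
        simp only [PySem.Chars.splitOn.go, hpre, if_true]
        rw [show List.drop [x].length (x :: xs) = xs by simp]
        rw [ih xs [] (cur.reverse :: acc) (by omega)]
        cases hm : pvSplit x xs with
        | nil => exact absurd hm (pvSplit_ne_nil x xs)
        | cons hh tt => simp [pvSplit, pvMapHead, hm]
      · have hpre : [c].isPrefixOf (x :: xs) = false := by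
          simp only [List.isPrefixOf, Bool.and_eq_false_iff]
          left
          simp only [beq_eq_false_iff_ne, ne_eq]
          exact fun hcx => hx hcx.symm
        simp only [PySem.Chars.splitOn.go, hpre, Bool.false_eq_true, if_false]
        rw [ih xs (x :: cur) acc (by omega)]
        cases hm : pvSplit c xs with
        | nil => exact absurd hm (pvSplit_ne_nil c xs)
        | cons hh tt => simp [pvSplit, pvMapHead, hm, hx]

theorem pvSplitOnEq (c : Char) (s : List Char) :
    PySem.Chars.splitOn s [c] = pvSplit c s := by
  rw [PySem.Chars.splitOn, pvGoEq c (s.length + 1) s [] [] (by omega)]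
  cases hm : pvSplit c s with
  | nil => exact absurd hm (pvSplit_ne_nil c s)
  | cons hh tt => simp [pvMapHead]

theorem pvSplit_not_mem {c : Char} {l : List Char} (h : c ∉ l) : pvSplit c l = [l] := by
  induction l with
  | nil => rfl
  | cons x xs ih =>
    simp only [List.mem_cons, not_or] at h
    have hx : ¬ x = c := fun e => h.1 e.symm
    simp [pvSplit, hx, ih h.2]

theorem pvSplit_first {c : Char} {u v : List Char} (h : c ∉ u) :
    pvSplit c (u ++ c :: v) = u :: pvSplit c v := by
  induction u with
  | nil => simp [pvSplit]
  | cons x xs ih =>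
    simp only [List.mem_cons, not_or] at h
    have hx : ¬ x = c := fun e => h.1 e.symm
    simp only [List.cons_append, pvSplit, if_neg hx, ih h.2]

-- splitOnMax.go with maxsplit 0 returns the rest as a single piece
theorem pvGo2Zero (c : Char) (fuel : Nat) (l cur : List Char) (acc : List (List Char)) :
    PySem.Chars.splitOnMax.go [c] fuel 0 l cur acc = ((cur.reverse ++ l) :: acc).reverse := by
  cases fuel with
  | zero => simp [PySem.Chars.splitOnMax.go]
  | succ f =>
    cases l with
    | nil => simp [PySem.Chars.splitOnMax.go]
    | cons x xs => simp [PySem.Chars.splitOnMax.go]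

-- splitOnMax.go with maxsplit 1 on a first-occurrence decomposition
theorem pvGo2One (c : Char) : ∀ (u : List Char) (fuel : Nat) (v cur : List Char) (acc : List (List Char)),
    c ∉ u → (u ++ c :: v).length ≤ fuel →
    PySem.Chars.splitOnMax.go [c] fuel 1 (u ++ c :: v) cur acc =
      acc.reverse ++ [cur.reverse ++ u, v] := by
  intro u
  induction u with
  | nil =>
    intro fuel v cur acc _ hf
    cases fuel with
    | zero => simp at hf
    | succ f =>
      have hpre : [c].isPrefixOf (c :: v) = true := by simp [List.isPrefixOf]
      simp only [List.nil_append, PySem.Chars.splitOnMax.go, hpre, if_true, if_neg (by omega : ¬ (1 = 0))]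
      rw [show List.drop [c].length (c :: v) = v by simp]
      rw [show (1 : Nat) - 1 = 0 by omega, pvGo2Zero]
      simp
  | cons x xs ih =>
    intro fuel v cur acc hmem hf
    simp only [List.mem_cons, not_or] at hmem
    cases fuel with
    | zero => simp at hf
    | succ f =>
      have hpre : [c].isPrefixOf (x :: (xs ++ c :: v)) = false := by
        simp only [List.isPrefixOf, Bool.and_eq_false_iff]
        left
        simp only [beq_eq_false_iff_ne, ne_eq]
        exact hmem.1
      simp only [List.cons_append, PySem.Chars.splitOnMax.go, hpre, Bool.false_eq_true, if_false,
        if_neg (by omega : ¬ (1 = 0))]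
      simp only [List.length_cons, List.length_append] at hf
      rw [ih f v (x :: cur) acc hmem.2 (by simp only [List.length_append, List.length_cons]; omega)]
      simp

theorem pvSplitMax1 {c : Char} {u v : List Char} (h : c ∉ u) :
    PySem.Chars.splitOnMax (u ++ c :: v) [c] 1 = [u, v] := by
  rw [PySem.Chars.splitOnMax, if_neg (by omega : ¬ ((1 : Int) < 0))]
  rw [show (1 : Int).toNat = 1 from rfl]
  rw [pvGo2One c u ((u ++ c :: v).length + 1) v [] [] h (by omega)]
  simp

-- [c] is an infix iff c is a member
theorem pvInfixSingleton {c : Char} {l : List Char} : [c] <:+: l ↔ c ∈ l := by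
  constructor
  · rintro ⟨s, t, rfl⟩; simp
  · intro h
    obtain ⟨s, t, rfl⟩ := List.append_of_mem h
    exact ⟨s, t, by simp⟩

theorem pvFindNotMem {c : Char} {l : List Char} (h : c ∉ l) : PySem.Chars.find l [c] = -1 := by
  rw [PySem.Chars.find_eq_neg_one_iff, pvInfixSingleton]; exact h

-- find points at the first occurrence
theorem pvFindFirst {c : Char} (u v : List Char) (h : c ∉ u) :
    PySem.Chars.find (u ++ c :: v) [c] = (u.length : Int) := by
  have hinf : [c] <:+: (u ++ c :: v) := ⟨u, v, by simp⟩
  have hne : PySem.Chars.find (u ++ c :: v) [c] ≠ -1 := by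
    rw [ne_eq, PySem.Chars.find_eq_neg_one_iff]
    exact not_not_intro hinf
  have h0 : 0 ≤ PySem.Chars.find (u ++ c :: v) [c] := by
    have := PySem.Chars.neg_one_le_find (s := u ++ c :: v) (sub := [c])
    omega
  obtain ⟨hpre, hmin⟩ := PySem.Chars.find_spec h0
  have hnotlt : ¬ (PySem.Chars.find (u ++ c :: v) [c]).toNat < u.length := by
    intro hlt
    obtain ⟨t, ht⟩ := hpre
    have h1 : ((u ++ c :: v).drop (PySem.Chars.find (u ++ c :: v) [c]).toNat)[0]? = some c := by
      rw [← ht]; rfl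
    rw [List.getElem?_drop] at h1
    rw [Nat.add_zero, List.getElem?_append_left hlt, List.getElem?_eq_getElem hlt] at h1
    have h2 : u[(PySem.Chars.find (u ++ c :: v) [c]).toNat] = c := by injection h1
    exact absurd (h2 ▸ List.getElem_mem hlt) h
  have hnotgt : ¬ u.length < (PySem.Chars.find (u ++ c :: v) [c]).toNat := by
    intro hlt
    have hno : ¬ [c] <+: (u ++ c :: v).drop u.length := hmin u.length hlt
    rw [List.drop_left] at hno
    exact hno ⟨v, rfl⟩
  omega

-- first-occurrence decomposition
theorem pvFirst {c : Char} {l : List Char} (h : c ∈ l) :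
    ∃ u v, l = u ++ c :: v ∧ c ∉ u := by
  induction l with
  | nil => simp at h
  | cons x xs ih =>
    by_cases hx : x = c
    · exact ⟨[], xs, by simp [hx], by simp⟩
    · have hx' : ¬ c = x := fun e => hx e.symm
      obtain ⟨u, v, rfl, hu⟩ := ih (by simpa [hx'] using h)
      exact ⟨x :: u, v, rfl, by simp [hu, hx']⟩

-- slices used by the two ports
theorem pvSliceTakeNat (s : List Char) (k : Nat) :
    PySem.List.slice s none (some ((k : Nat) : Int)) = s.take k := by
  simp only [PySem.List.slice, PySem.List.clampIdx]
  rw [if_neg (by omega : ¬ ((k : Int) < 0))]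
  simp only [Int.toNat_natCast, List.drop_zero, Nat.sub_zero]
  rcases le_total k s.length with h | h
  · rw [min_eq_left h]
  · rw [min_eq_right h, List.take_of_length_le h, List.take_length]

theorem pvSliceNegOne (s : List Char) :
    PySem.List.slice s none (some (-1)) = s.dropLast := by
  simp only [PySem.List.slice, PySem.List.clampIdx]
  rw [if_pos (by omega : (-1 : Int) < 0)]
  cases s with
  | nil => simp
  | cons x xs =>
    rw [if_neg (by simp only [List.length_cons]; omega)]
    simp only [List.drop_zero, Nat.sub_zero]
    rw [List.dropLast_eq_take]
    congr 1
    simp only [List.length_cons]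
    omega

theorem pvSliceDropNat (s : List Char) (k : Nat) :
    PySem.List.slice s (some ((k : Nat) : Int)) none = s.drop k := by
  simp only [PySem.List.slice, PySem.List.clampIdx]
  rw [if_neg (by omega : ¬ ((k : Int) < 0))]
  simp only [Int.toNat_natCast]
  rcases le_total k s.length with h | h
  · rw [min_eq_left h, List.take_of_length_le (by simp)]
  · rw [min_eq_right h]
    simp [List.drop_of_length_le h]

-- the '#' test B does on the whole remaining string equals A's startswith on the line
theorem pvHashIff (u rest : List Char) (hrest : rest = [] ∨ ∃ v, rest = '\n' :: v) :
    (PySem.List.slice (u ++ rest) none (some 1) = ['#']) ↔ PySem.Chars.startswith u ['#'] = true := by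
  rw [show (1 : Int) = ((1 : Nat) : Int) by simp, pvSliceTakeNat, PySem.Chars.startswith_iff]
  cases u with
  | nil =>
    simp only [List.nil_append]
    constructor
    · intro hx
      exfalso
      rcases hrest with rfl | ⟨v, rfl⟩
      · simp at hx
      · rw [show List.take 1 ('\n' :: v) = ['\n'] from rfl] at hx
        simp at hx
    · intro hx
      exact absurd hx (by simp)
  | cons x u' =>
    rw [show List.take 1 ((x :: u') ++ rest) = [x] from rfl]
    simp [List.cons_prefix_cons, eq_comm]

-- B reads the line's last character through the whole remaining string
theorem pvGetDLast (u rest : List Char) (h : u ≠ []) :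
    PySem.List.pyGetD (u ++ rest) ((u.length : Int) - 1) ' ' = u.getLast h := by
  have hul : 1 ≤ u.length := by
    cases u with
    | nil => exact absurd rfl h
    | cons a as => simp
  rw [PySem.List.pyGetD_eq_getElem _ ' ' (by omega) (by simp only [List.length_append]; push_cast; omega)]
  rw [List.getLast_eq_getElem]
  have hidx : (((u.length : Nat) : Int) - 1).toNat = u.length - 1 := by omega
  simp only [hidx]
  rw [List.getElem_append_left (by omega)]

theorem pvGetLastCons (a : List Char) (c : Char) (b : List Char) (hb : b ≠ []) (h : a ++ c :: b ≠ []) :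
    (a ++ c :: b).getLast h = b.getLast hb := by
  induction a with
  | nil => exact List.getLast_cons hb
  | cons x xs ih =>
    have hxs : xs ++ c :: b ≠ [] := by simp
    show (x :: (xs ++ c :: b)).getLast (by simp) = b.getLast hb
    rw [List.getLast_cons hxs]
    exact ih hxs

-- the piece B emits for the current line equals A's per-line transform
theorem pvCore (u rest : List Char) (hrest : rest = [] ∨ ∃ v, rest = '\n' :: v) :
    PySem.List.slice (u ++ rest) none (some (
      if PySem.List.slice (u ++ rest) none (some 1) = ['#'] then
        if PySem.Chars.find (u ++ rest) [' '] ≠ -1 ∧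
            PySem.Chars.find (u ++ rest) [' '] + 1 < (u.length : Int) ∧
            PySem.Chars.isIn [PySem.List.pyGetD (u ++ rest) ((u.length : Int) - 1) ' '] pvPunct then
          (u.length : Int) - 1
        else (u.length : Int)
      else (u.length : Int))) = pvAFix u := by
  by_cases hh : PySem.Chars.startswith u ['#'] = true
  · rw [if_pos ((pvHashIff u rest hrest).mpr hh)]
    by_cases hsp : ' ' ∈ u
    · obtain ⟨w, z, rfl, hw⟩ := pvFirst hsp
      have hfindU : PySem.Chars.find ((w ++ ' ' :: z) ++ rest) [' '] = (w.length : Int) := by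
        rw [List.append_assoc, List.cons_append]
        exact pvFindFirst w (z ++ rest) hw
      have hAin : PySem.Chars.isIn [' '] (w ++ ' ' :: z) = true := by
        simp only [PySem.Chars.isIn, pvFindFirst w z hw, bne_iff_ne, ne_eq]
        omega
      have hsplit : PySem.List.pyGetD ((PySem.Chars.splitMax? (w ++ ' ' :: z) [' '] 1).getD []) 1 [] = z := by
        rw [PySem.Chars.splitMax?, if_neg (by simp), Option.getD_some, pvSplitMax1 hw,
          PySem.List.pyGetD_ofNat']
        rfl
      have hAFix : pvAFix (w ++ ' ' :: z) =
          (if !z.isEmpty && PySem.Chars.isIn [PySem.List.pyGetD z (-1) ' '] pvPunct then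
            PySem.List.slice (w ++ ' ' :: z) none (some (-1)) else (w ++ ' ' :: z)) := by
        simp only [pvAFix, hh, hAin, Bool.and_self, reduceIte, hsplit]
      rw [hAFix, hfindU]
      by_cases hz : z = []
      · subst hz
        rw [if_neg (by
          rintro ⟨-, h2, -⟩
          simp only [List.length_append, List.length_cons, List.length_nil] at h2
          omega)]
        rw [if_neg (by simp)]
        rw [pvSliceTakeNat, List.take_left]
      · have hchar : PySem.List.pyGetD ((w ++ ' ' :: z) ++ rest) (((w ++ ' ' :: z).length : Int) - 1) ' '
            = PySem.List.pyGetD z (-1) ' ' := by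
          have hne : w ++ ' ' :: z ≠ [] := by simp
          rw [pvGetDLast _ rest hne, PySem.List.pyGetD_neg_one z ' ' hz]
          exact pvGetLastCons w ' ' z hz hne
        rw [hchar]
        by_cases hp : PySem.Chars.isIn [PySem.List.pyGetD z (-1) ' '] pvPunct = true
        · have hzl : 0 < z.length := List.length_pos_of_ne_nil hz
          rw [if_pos ⟨by omega,
            by simp only [List.length_append, List.length_cons]; push_cast; omega, hp⟩]
          rw [if_pos (by
            have : z.isEmpty = false := by simp [hz]
            simp [this, hp])]
          rw [pvSliceNegOne]
          rw [show ((w ++ ' ' :: z).length : Int) - 1 = (((w ++ ' ' :: z).length - 1 : Nat) : Int) by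
            simp only [List.length_append, List.length_cons]; push_cast; omega]
          rw [pvSliceTakeNat, List.take_append_of_le_length (by omega), ← List.dropLast_eq_take]
        · rw [if_neg (by rintro ⟨-, -, h3⟩; exact hp h3)]
          rw [if_neg (by simp [hp])]
          rw [pvSliceTakeNat, List.take_left]
    · have hAin : PySem.Chars.isIn [' '] u = false := by
        rw [PySem.Chars.isIn, pvFindNotMem hsp]
        decide
      have hA : pvAFix u = u := by simp [pvAFix, hAin]
      have hcond : ¬ (PySem.Chars.find (u ++ rest) [' '] ≠ -1 ∧
          PySem.Chars.find (u ++ rest) [' '] + 1 < (u.length : Int) ∧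
          PySem.Chars.isIn [PySem.List.pyGetD (u ++ rest) ((u.length : Int) - 1) ' '] pvPunct) := by
        rcases hrest with rfl | ⟨v, rfl⟩
        · rw [List.append_nil, pvFindNotMem hsp]
          rintro ⟨h1, -, -⟩
          exact h1 rfl
        · by_cases hv : ' ' ∈ v
          · obtain ⟨p, q, rfl, hp⟩ := pvFirst hv
            have hf : PySem.Chars.find (u ++ '\n' :: (p ++ ' ' :: q)) [' ']
                = (((u ++ '\n' :: p).length : Nat) : Int) := by
              rw [show u ++ '\n' :: (p ++ ' ' :: q) = (u ++ '\n' :: p) ++ ' ' :: q by simp]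
              exact pvFindFirst _ _ (by simp [hsp, hp])
            rintro ⟨-, h2, -⟩
            rw [hf] at h2
            simp only [List.length_append, List.length_cons] at h2
            push_cast at h2
            omega
          · have hf : PySem.Chars.find (u ++ '\n' :: v) [' '] = -1 :=
              pvFindNotMem (by simp [hsp, hv])
            rintro ⟨h1, -, -⟩
            exact h1 hf
      rw [if_neg hcond, hA, pvSliceTakeNat, List.take_left]
  · rw [if_neg (fun hc => hh ((pvHashIff u rest hrest).mp hc))]
    have hA : pvAFix u = u := by
      rw [Bool.not_eq_true] at hh
      simp [pvAFix, hh]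
    rw [hA, pvSliceTakeNat, List.take_left]

theorem pvMain : ∀ (n : Nat) (s : List Char), s.length ≤ n →
    fix_heading_punctuation_py_altGo s = (pvSplit '\n' s).map pvAFix := by
  intro n
  induction n with
  | zero =>
    intro s h
    cases s with
    | nil =>
      have hnil : PySem.Chars.find ([] : List Char) ['\n'] = -1 := pvFindNotMem (by simp)
      rw [fix_heading_punctuation_py_altGo]
      simp [hnil, pvSplit, pvAFix, PySem.Chars.startswith, List.isPrefixOf,
        PySem.List.slice, PySem.List.clampIdx]
    | cons x xs => simp at h
  | succ m ih =>
    intro s hlen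
    by_cases h : PySem.Chars.find s ['\n'] = -1
    · have hmem : '\n' ∉ s := by
        intro hm
        obtain ⟨u, v, rfl, hu⟩ := pvFirst hm
        rw [pvFindFirst u v hu] at h
        omega
      rw [fix_heading_punctuation_py_altGo]
      simp only [h, reduceIte, reduceDIte]
      rw [pvSplit_not_mem hmem, List.map_cons, List.map_nil]
      have hc := pvCore s [] (Or.inl rfl)
      rw [List.append_nil] at hc
      rw [hc]
    · have hmem : '\n' ∈ s := by
        by_contra hm
        exact h (pvFindNotMem hm)
      obtain ⟨u, v, rfl, hu⟩ := pvFirst hmem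
      have hf : PySem.Chars.find (u ++ '\n' :: v) ['\n'] = (u.length : Int) := pvFindFirst u v hu
      rw [fix_heading_punctuation_py_altGo]
      simp only [hf]
      rw [if_neg (by omega : ¬ ((u.length : Int) = -1)),
        dif_neg (by omega : ¬ ((u.length : Int) = -1))]
      have htail : PySem.List.slice (u ++ '\n' :: v) (some ((u.length : Int) + 1)) none = v := by
        rw [show ((u.length : Int) + 1) = (((u.length + 1 : Nat)) : Int) by omega, pvSliceDropNat,
          show u ++ '\n' :: v = (u ++ ['\n']) ++ v by simp,
          show u.length + 1 = (u ++ ['\n']).length by simp,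
          List.drop_left]
      rw [htail, pvSplit_first hu, List.map_cons]
      congr 1
      · exact pvCore u ('\n' :: v) (Or.inr ⟨v, rfl⟩)
      · exact ih v (by simp only [List.length_append, List.length_cons] at hlen; omega)

-- ===== VERDICT (by name: the statement is the Claim_ definition above) =====
theorem fix_heading_punctuation_py_spec : Claim_equal_fix_heading_punctuation_py := by
  intro content _
  unfold Spec_fix_heading_punctuation_py
  simp only [fix_heading_punctuation_py, fix_heading_punctuation_py_alt]
  rw [PySem.List.foldl_append_singleton_eq_map, List.nil_append, pvSplitOnEq,
    pvMain content.toList.length content.toList (le_refl _)]
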